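-- pv_equiv track=rewrite | github.com/YuanzhangLin/UICompass | AndroidSourceCodeAnalyzer4/UiMapGeneration.py | is_activity_class
-- ===== SOURCE A (Python) =====
-- from collections import deque # Needed for BFS traversal
--
-- def is_activity_class(class_name: str, class_graph: dict) -> bool:
--     """
--     检查一个类是否通过继承链是 Activity (继承自 android.app.Activity 或 androidx.appcompat.app.AppCompatActivity)。
--
--     Args:
--         class_name: 要检查的类的完整名称。
--         class_graph: 类继承关系字典 {class_name: [superclass1, ...], ...}。
--                      在 process_project 中，这个参数将是 class_to_extends_map。
--
--     Returns:
--         如果是 Activity 类则返回 True，否则返回 False。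
--     """
--     if class_name in {"android.app.Activity", "androidx.appcompat.app.AppCompatActivity"}:
--         return True
--
--     queue = deque([class_name])
--     visited = {class_name}
--
--     while queue:
--         current_class = queue.popleft()
--         superclasses = class_graph.get(current_class, [])
--
--         for superclass in superclasses:
--             if superclass in {"android.app.Activity", "androidx.appcompat.app.AppCompatActivity"}:
--                 return True
--
--             if superclass == "java.lang.Object":
--                 continue
--
--             if superclass not in visited:
--                 visited.add(superclass)
--                 queue.append(superclass)
--
--     return False
--
--
--     # If the queue is empty and we haven't found Activity, it's not an Activity class via this graph
--     return False
-- ===== SOURCE B (Python) =====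
-- TARGETS = {"android.app.Activity", "androidx.appcompat.app.AppCompatActivity"}
--
-- def is_activity_class(class_name: str, class_graph: dict) -> bool:
--     if class_name in TARGETS:
--         return True
--     reached = {class_name}
--     while True:
--         new = set()
--         for c in reached:
--             for s in class_graph.get(c, []):
--                 if s in TARGETS:
--                     return True
--                 if s != "java.lang.Object" and s not in reached:
--                     new.add(s)
--         if not new:
--             return False
--         reached |= new
-- ===== Notes on version B (the rewrite author's own statement) =====
-- stated objective: alternative
-- what changed: Replaced the deque-based BFS (pop one node, enqueue its unvisited superclasses) by a round-based fixpoint saturation: each round rescans the whole reached set to build the next frontier, stopping at a fixpoint or on a target superclass.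
import Mathlib
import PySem

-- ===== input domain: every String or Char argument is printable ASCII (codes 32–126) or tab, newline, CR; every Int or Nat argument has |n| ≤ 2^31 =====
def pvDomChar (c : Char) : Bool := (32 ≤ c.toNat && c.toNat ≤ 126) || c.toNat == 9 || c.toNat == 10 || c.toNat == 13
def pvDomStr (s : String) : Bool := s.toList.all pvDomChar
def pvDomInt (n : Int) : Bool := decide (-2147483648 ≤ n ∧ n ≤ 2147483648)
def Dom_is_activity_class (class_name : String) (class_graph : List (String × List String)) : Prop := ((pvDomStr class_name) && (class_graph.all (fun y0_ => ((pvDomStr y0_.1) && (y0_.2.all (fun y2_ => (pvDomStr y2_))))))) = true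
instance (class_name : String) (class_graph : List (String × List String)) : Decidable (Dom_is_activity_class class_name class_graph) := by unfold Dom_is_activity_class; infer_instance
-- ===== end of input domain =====

-- B replaces A's deque-based BFS by a round-based fixpoint saturation that recomputes the
-- frontier from the whole reached set each round (objective: alternative; return value only).

-- shared constants / dict lookup (both Pythons use the same literals and class_graph.get(c, []))
def pvTargets : List String := ["android.app.Activity", "androidx.appcompat.app.AppCompatActivity"]
def pvObj : String := "java.lang.Object"
def pvSuccs (g : List (String × List String)) (c : String) : List String :=
  PySem.Dict.getD (PySem.Dict.mk g) c []

-- all strings occurring as superclasses anywhere in the graph (termination bookkeeping only)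
def pvCand (g : List (String × List String)) : List String := (g.map Prod.snd).flatten

def pvMeasure (g : List (String × List String)) (v : PySem.Set String) : Nat :=
  ((pvCand g).toFinset \ v.toFinset).card

lemma pvSuccs_cons (k c : String) (vs : List String) (rest : List (String × List String)) :
    pvSuccs ((k, vs) :: rest) c = if k == c then vs else pvSuccs rest c := by
  simp [pvSuccs, PySem.Dict.getD, PySem.Dict.get?_mk_cons]; split <;> rfl

lemma pvSuccs_subset (g : List (String × List String)) (c : String) :
    ∀ s ∈ pvSuccs g c, s ∈ pvCand g := by
  induction g with
  | nil => simp [pvSuccs, pvCand, PySem.Dict.getD, PySem.Dict.get?]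
  | cons p rest ih =>
    obtain ⟨k, vs⟩ := p
    intro s hs
    rw [pvSuccs_cons] at hs
    simp only [pvCand, List.map_cons, List.flatten_cons, List.mem_append]
    split at hs
    · exact Or.inl hs
    · exact Or.inr (ih s hs)

lemma pvMeasure_add {g : List (String × List String)} {v : PySem.Set String} {s : String}
    (hc : s ∈ pvCand g) (hv : s ∉ v) :
    pvMeasure g (PySem.Set.add v s) + 1 = pvMeasure g v := by
  unfold pvMeasure
  rw [PySem.Set.add_of_not_mem hv]
  have h1 : (v ++ [s]).toFinset = insert s v.toFinset := by
    simp [List.toFinset_append]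
  rw [h1, Finset.sdiff_insert]
  exact Finset.card_erase_add_one (by simp [Finset.mem_sdiff, List.mem_toFinset, hc, hv])

-- ===== PORT A =====
-- inner `for superclass in superclasses` loop of A; `none` = the Python `return True`
def pvBfsScan (visited : PySem.Set String) (queue : List String) :
    List String → Option (List String × PySem.Set String)
  | [] => some (queue, visited)
  | s :: rest =>
    if s ∈ pvTargets then none
    else if s = pvObj then pvBfsScan visited queue rest
    else if s ∈ visited then pvBfsScan visited queue rest
    else pvBfsScan (PySem.Set.add visited s) (queue ++ [s]) rest

lemma pvBfsScan_measure (g : List (String × List String)) :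
    ∀ (ss : List String) (v : PySem.Set String) (q q' : List String) (v' : PySem.Set String),
      (∀ s ∈ ss, s ∈ pvCand g) → pvBfsScan v q ss = some (q', v') →
      pvMeasure g v' + q'.length ≤ pvMeasure g v + q.length := by
  intro ss
  induction ss with
  | nil =>
    intro v q q' v' _ h
    simp only [pvBfsScan, Option.some.injEq, Prod.mk.injEq] at h
    obtain ⟨rfl, rfl⟩ := h
    exact le_rfl
  | cons s rest ih =>
    intro v q q' v' hsub h
    simp only [pvBfsScan] at h
    split_ifs at h with h1 h2 h3
    · exact ih v q q' v' (fun x hx => hsub x (by simp [hx])) h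
    · exact ih v q q' v' (fun x hx => hsub x (by simp [hx])) h
    · have := ih (PySem.Set.add v s) (q ++ [s]) q' v' (fun x hx => hsub x (by simp [hx])) h
      have hm := pvMeasure_add (g := g) (hsub s (by simp)) h3
      simp only [List.length_append, List.length_cons, List.length_nil] at this ⊢
      omega

-- A's `while queue:` loop
def pvBfsLoop (g : List (String × List String)) (queue : List String)
    (visited : PySem.Set String) : Bool :=
  match queue with
  | [] => false
  | c :: rest =>
    match h : pvBfsScan visited rest (pvSuccs g c) with
    | none => true
    | some (q', v') => pvBfsLoop g q' v'
termination_by pvMeasure g visited + queue.length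
decreasing_by
  have := pvBfsScan_measure g (pvSuccs g c) visited rest q' v' (pvSuccs_subset g c) h
  simp only [List.length_cons]
  omega

def is_activity_class (class_name : String) (class_graph : List (String × List String)) : Bool :=
  if class_name ∈ pvTargets then true
  else pvBfsLoop class_graph [class_name] (PySem.Set.ofList [class_name])

-- ===== PORT B =====
-- inner `for s in class_graph.get(c, [])` loop of B; `none` = the Python `return True`
def pvSatInner (reached newAcc : PySem.Set String) :
    List String → Option (PySem.Set String)
  | [] => some newAcc
  | s :: rest =>
    if s ∈ pvTargets then none
    else if s ≠ pvObj ∧ s ∉ reached then pvSatInner reached (PySem.Set.add newAcc s) rest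
    else pvSatInner reached newAcc rest

-- B's `for c in reached` loop of one round
def pvSatOuter (g : List (String × List String)) (reached newAcc : PySem.Set String) :
    List String → Option (PySem.Set String)
  | [] => some newAcc
  | c :: cs =>
    match pvSatInner reached newAcc (pvSuccs g c) with
    | none => none
    | some acc' => pvSatOuter g reached acc' cs

lemma pvSatInner_new :
    ∀ (ss : List String) (r acc acc' : PySem.Set String), pvSatInner r acc ss = some acc' →
      ∀ x ∈ acc', x ∈ acc ∨ (x ∈ ss ∧ x ∉ pvTargets ∧ x ≠ pvObj ∧ x ∉ r) := by
  intro ss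
  induction ss with
  | nil => intro r acc acc' h x hx; simp [pvSatInner] at h; subst h; exact Or.inl hx
  | cons s rest ih =>
    intro r acc acc' h x hx
    simp only [pvSatInner] at h
    split_ifs at h with h1 h2
    · rcases ih r _ acc' h x hx with hL | ⟨hi, hrest⟩
      · rcases (PySem.Set.mem_add _ _ _).1 hL with hL | rfl
        · exact Or.inl hL
        · exact Or.inr ⟨by simp, h1, h2.1, h2.2⟩
      · exact Or.inr ⟨by simp [hi], hrest⟩
    · rcases ih r _ acc' h x hx with hL | ⟨hi, hrest⟩
      · exact Or.inl hL
      · exact Or.inr ⟨by simp [hi], hrest⟩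

lemma pvSatOuter_new (g : List (String × List String)) :
    ∀ (cs : List String) (r acc nw : PySem.Set String), pvSatOuter g r acc cs = some nw →
      ∀ x ∈ nw, x ∈ acc ∨ ∃ c ∈ cs, x ∈ pvSuccs g c ∧ x ∉ pvTargets ∧ x ≠ pvObj ∧ x ∉ r := by
  intro cs
  induction cs with
  | nil => intro r acc nw h x hx; simp [pvSatOuter] at h; subst h; exact Or.inl hx
  | cons c cs ih =>
    intro r acc nw h x hx
    simp only [pvSatOuter] at h
    cases hin : pvSatInner r acc (pvSuccs g c) with
    | none => simp [hin] at h
    | some acc' =>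
      rw [hin] at h
      rcases ih r acc' nw h x hx with hL | ⟨c', hc', hrest⟩
      · rcases pvSatInner_new _ r acc acc' hin x hL with hL' | ⟨hi, hrest⟩
        · exact Or.inl hL'
        · exact Or.inr ⟨c, by simp, hi, hrest⟩
      · exact Or.inr ⟨c', by simp [hc'], hrest⟩

lemma pvMeasure_union_lt {g : List (String × List String)} {r nw : PySem.Set String} {x : String}
    (hc : x ∈ pvCand g) (hxr : x ∉ r) (hxn : x ∈ nw) :
    pvMeasure g (PySem.Set.union r nw) < pvMeasure g r := by
  unfold pvMeasure
  apply Finset.card_lt_card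
  have hsub : (pvCand g).toFinset \ (PySem.Set.union r nw).toFinset ⊆
      (pvCand g).toFinset \ r.toFinset := by
    intro y hy
    simp only [Finset.mem_sdiff, List.mem_toFinset] at hy ⊢
    exact ⟨hy.1, fun hyr => hy.2 ((PySem.Set.mem_union _ _ _).2 (Or.inl hyr))⟩
  rw [Finset.ssubset_iff_of_subset hsub]
  have hxu : x ∈ PySem.Set.union r nw := (PySem.Set.mem_union r nw x).2 (Or.inr hxn)
  refine ⟨x, by simp only [Finset.mem_sdiff, List.mem_toFinset]; exact ⟨hc, hxr⟩, ?_⟩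
  simp only [Finset.mem_sdiff, List.mem_toFinset, not_and, not_not]
  exact fun _ => hxu

-- B's `while True:` loop
def pvSatLoop (g : List (String × List String)) (reached : PySem.Set String) : Bool :=
  match h : pvSatOuter g reached PySem.Set.empty reached with
  | none => true
  | some nw =>
    if hnw : nw.isEmpty then false
    else pvSatLoop g (PySem.Set.union reached nw)
termination_by pvMeasure g reached
decreasing_by
  rcases nw with _ | ⟨x, nw'⟩
  · simp at hnw
  · have hx := pvSatOuter_new g reached reached PySem.Set.empty _ h x (by simp)
    rcases hx with hx | ⟨c, _, hi, _, _, hr⟩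
    · simp [PySem.Set.empty] at hx
    · exact pvMeasure_union_lt (pvSuccs_subset g c x hi) hr (by simp)

def is_activity_class_alt (class_name : String) (class_graph : List (String × List String)) : Bool :=
  if class_name ∈ pvTargets then true
  else pvSatLoop class_graph (PySem.Set.ofList [class_name])

-- ===== PRECONDITION & SPEC =====
def Spec_is_activity_class (class_name : String) (class_graph : List (String × List String)) (out : Bool) : Prop := out = is_activity_class_alt class_name class_graph
instance (class_name : String) (class_graph : List (String × List String)) (out : Bool) : Decidable (Spec_is_activity_class class_name class_graph out) := by unfold Spec_is_activity_class; infer_instance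

-- ===== CLAIM (what is proved, stated in full; the proofs are below) =====
def Claim_equal_is_activity_class : Prop := ∀ (class_name : String) (class_graph : List (String × List String)), Dom_is_activity_class class_name class_graph → Spec_is_activity_class class_name class_graph (is_activity_class class_name class_graph)

-- ===== LEMMAS AND PROOFS =====

-- the inheritance step both traversals take: a non-target, non-Object superclass edge
def pvEdge (g : List (String × List String)) (a b : String) : Prop :=
  b ∈ pvSuccs g a ∧ b ∉ pvTargets ∧ b ≠ pvObj

def pvReach (g : List (String × List String)) : String → String → Prop :=
  Relation.ReflTransGen (pvEdge g)

-- "has a direct target superclass"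
def pvTE (g : List (String × List String)) (c : String) : Prop :=
  ∃ s ∈ pvSuccs g c, s ∈ pvTargets

def pvSafe (g : List (String × List String)) (x : String) : Prop :=
  ¬ ∃ y, pvReach g x y ∧ pvTE g y

lemma pvReach_mem_closed {g : List (String × List String)} {R : List String}
    (hcl : ∀ c ∈ R, ¬ pvTE g c ∧ ∀ s ∈ pvSuccs g c, s ≠ pvObj → s ∈ R)
    {x y : String} (h : pvReach g x y) (hx : x ∈ R) : y ∈ R := by
  induction h with
  | refl => exact hx
  | tail _ hstep ih => exact (hcl _ ih).2 _ hstep.1 hstep.2.2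

lemma pvClosed_safe (g : List (String × List String)) (R : List String)
    (hcl : ∀ c ∈ R, ¬ pvTE g c ∧ ∀ s ∈ pvSuccs g c, s ≠ pvObj → s ∈ R) :
    ∀ x ∈ R, pvSafe g x := by
  intro x hx ⟨y, hreach, hte⟩
  exact (hcl y (pvReach_mem_closed hcl hreach hx)).1 hte

lemma pvBfsLoop_cons_none {g : List (String × List String)} {c : String}
    {rest : List String} {v : PySem.Set String}
    (h : pvBfsScan v rest (pvSuccs g c) = none) :
    pvBfsLoop g (c :: rest) v = true := by
  rw [pvBfsLoop]
  split
  · rfl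
  · next q' v' heq => rw [heq] at h; cases h

lemma pvBfsLoop_cons_some {g : List (String × List String)} {c : String}
    {rest q' : List String} {v v' : PySem.Set String}
    (h : pvBfsScan v rest (pvSuccs g c) = some (q', v')) :
    pvBfsLoop g (c :: rest) v = pvBfsLoop g q' v' := by
  rw [pvBfsLoop]
  split
  · next heq => rw [heq] at h; cases h
  · next a b heq =>
    have hab : a = q' ∧ b = v' := by rw [heq] at h; simpa using h
    rw [hab.1, hab.2]

lemma pvBfsScan_none :
    ∀ (ss : List String) (v : PySem.Set String) (q : List String),
      pvBfsScan v q ss = none → ∃ s ∈ ss, s ∈ pvTargets := by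
  intro ss
  induction ss with
  | nil => intro v q h; simp [pvBfsScan] at h
  | cons s rest ih =>
    intro v q h
    simp only [pvBfsScan] at h
    by_cases h1 : s ∈ pvTargets
    · exact ⟨s, by simp, h1⟩
    · rw [if_neg h1] at h
      by_cases h2 : s = pvObj
      · rw [if_pos h2] at h
        obtain ⟨t, ht, htt⟩ := ih v q h; exact ⟨t, by simp [ht], htt⟩
      · rw [if_neg h2] at h
        by_cases h3 : s ∈ v
        · rw [if_pos h3] at h
          obtain ⟨t, ht, htt⟩ := ih v q h; exact ⟨t, by simp [ht], htt⟩
        · rw [if_neg h3] at h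
          obtain ⟨t, ht, htt⟩ := ih _ _ h; exact ⟨t, by simp [ht], htt⟩

lemma pvBfsScan_some :
    ∀ (ss : List String) (v : PySem.Set String) (q q' : List String) (v' : PySem.Set String),
      pvBfsScan v q ss = some (q', v') →
      (∀ s ∈ ss, s ∉ pvTargets) ∧
      (∀ x ∈ v, x ∈ v') ∧
      (∀ s ∈ ss, s ≠ pvObj → s ∈ v') ∧
      (∀ x ∈ q', x ∈ q ∨ (x ∈ ss ∧ x ∉ pvTargets ∧ x ≠ pvObj)) ∧
      (∀ x ∈ v', x ∈ v ∨ x ∈ q') ∧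
      (∀ x ∈ q, x ∈ q') := by
  intro ss
  induction ss with
  | nil =>
    intro v q q' v' h
    simp only [pvBfsScan, Option.some.injEq, Prod.mk.injEq] at h
    obtain ⟨rfl, rfl⟩ := h
    exact ⟨by simp, fun x hx => hx, by simp, fun x hx => Or.inl hx,
      fun x hx => Or.inl hx, fun x hx => hx⟩
  | cons s rest ih =>
    intro v q q' v' h
    simp only [pvBfsScan] at h
    by_cases h1 : s ∈ pvTargets
    · rw [if_pos h1] at h; cases h
    · rw [if_neg h1] at h
      by_cases h2 : s = pvObj
      · rw [if_pos h2] at h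
        obtain ⟨A, B, C, D, E, F⟩ := ih v q q' v' h
        refine ⟨?_, B, ?_, ?_, E, F⟩
        · intro t ht; rcases List.mem_cons.1 ht with rfl | ht
          · exact h1
          · exact A t ht
        · intro t ht ho; rcases List.mem_cons.1 ht with rfl | ht
          · exact absurd h2 ho
          · exact C t ht ho
        · intro x hx
          rcases D x hx with hxq | ⟨hi, ht, ho⟩
          · exact Or.inl hxq
          · exact Or.inr ⟨by simp [hi], ht, ho⟩
      · rw [if_neg h2] at h
        by_cases h3 : s ∈ v
        · rw [if_pos h3] at h
          obtain ⟨A, B, C, D, E, F⟩ := ih v q q' v' h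
          refine ⟨?_, B, ?_, ?_, E, F⟩
          · intro t ht; rcases List.mem_cons.1 ht with rfl | ht
            · exact h1
            · exact A t ht
          · intro t ht ho; rcases List.mem_cons.1 ht with rfl | ht
            · exact B t h3
            · exact C t ht ho
          · intro x hx
            rcases D x hx with hxq | ⟨hi, ht, ho⟩
            · exact Or.inl hxq
            · exact Or.inr ⟨by simp [hi], ht, ho⟩
        · rw [if_neg h3] at h
          obtain ⟨A, B, C, D, E, F⟩ := ih (PySem.Set.add v s) (q ++ [s]) q' v' h
          refine ⟨?_, ?_, ?_, ?_, ?_, ?_⟩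
          · intro t ht; rcases List.mem_cons.1 ht with rfl | ht
            · exact h1
            · exact A t ht
          · intro x hx; exact B x ((PySem.Set.mem_add _ _ _).2 (Or.inl hx))
          · intro t ht ho; rcases List.mem_cons.1 ht with rfl | ht
            · exact B t ((PySem.Set.mem_add _ _ _).2 (Or.inr rfl))
            · exact C t ht ho
          · intro x hx
            rcases D x hx with hxq | ⟨hi, ht, ho⟩
            · rcases List.mem_append.1 hxq with hxq | hxs
              · exact Or.inl hxq
              · have hxs' : x = s := by simpa using hxs
                subst hxs'
                exact Or.inr ⟨by simp, h1, h2⟩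
            · exact Or.inr ⟨by simp [hi], ht, ho⟩
          · intro x hx
            rcases E x hx with hxv | hxq'
            · rcases (PySem.Set.mem_add _ _ _).1 hxv with hxv | rfl
              · exact Or.inl hxv
              · exact Or.inr (F x (by simp))
            · exact Or.inr hxq'
          · intro x hx; exact F x (by simp [hx])

lemma pvBfsLoop_true (g : List (String × List String)) (cn : String) :
    ∀ (q : List String) (v : PySem.Set String), (∀ x ∈ q, pvReach g cn x) →
      pvBfsLoop g q v = true → ∃ c, pvReach g cn c ∧ pvTE g c := by
  intro q v
  induction q, v using pvBfsLoop.induct g with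
  | case1 v => intro _ h; simp [pvBfsLoop] at h
  | case2 v c rest h' =>
    intro hq _
    obtain ⟨s, hs, hst⟩ := pvBfsScan_none _ _ _ h'
    exact ⟨c, hq c (by simp), ⟨s, hs, hst⟩⟩
  | case3 v c rest q' v' h' ih =>
    intro hq htrue
    obtain ⟨A, B, C, D, E, F⟩ := pvBfsScan_some _ _ _ _ _ h'
    apply ih
    · intro x hx
      rcases D x hx with hxq | ⟨hi, ht, ho⟩
      · exact hq x (by simp [hxq])
      · exact Relation.ReflTransGen.tail (hq c (by simp)) ⟨hi, ht, ho⟩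
    · rwa [pvBfsLoop_cons_some h'] at htrue

lemma pvBfsLoop_false (g : List (String × List String)) :
    ∀ (q : List String) (v : PySem.Set String), (∀ x ∈ q, x ∈ v) →
      (∀ c ∈ v, c ∉ q → ¬ pvTE g c ∧ ∀ s ∈ pvSuccs g c, s ≠ pvObj → s ∈ v) →
      pvBfsLoop g q v = false → ∀ x ∈ v, pvSafe g x := by
  intro q v
  induction q, v using pvBfsLoop.induct g with
  | case1 v =>
    intro _ hcl _ x hx
    exact pvClosed_safe g v (fun c hc => hcl c hc (by simp)) x hx
  | case2 v c rest h' =>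
    intro _ _ hfalse
    rw [pvBfsLoop_cons_none h'] at hfalse
    cases hfalse
  | case3 v c rest q' v' h' ih =>
    intro hqv hcl hfalse x hx
    obtain ⟨A, B, C, D, E, F⟩ := pvBfsScan_some _ _ _ _ _ h'
    have hqv' : ∀ y ∈ q', y ∈ v' := by
      intro y hy
      rcases D y hy with hyr | ⟨hi, _, ho⟩
      · exact B y (hqv y (by simp [hyr]))
      · exact C y hi ho
    have hcl' : ∀ d ∈ v', d ∉ q' → ¬ pvTE g d ∧ ∀ s ∈ pvSuccs g d, s ≠ pvObj → s ∈ v' := by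
      intro d hd hdq
      rcases E d hd with hdv | hdq'
      · by_cases hdc : d = c
        · subst hdc
          exact ⟨fun ⟨s, hs, hst⟩ => A s hs hst, C⟩
        · by_cases hdrest : d ∈ rest
          · exact absurd (F d hdrest) hdq
          · have hold := hcl d hdv (by simp [hdc, hdrest])
            exact ⟨hold.1, fun s hs ho => B s (hold.2 s hs ho)⟩
      · exact absurd hdq' hdq
    exact ih hqv' hcl' (by rwa [pvBfsLoop_cons_some h'] at hfalse) x (B x hx)

theorem is_activity_class_A_iff (cn : String) (g : List (String × List String)) :
    is_activity_class cn g = true ↔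
      (cn ∈ pvTargets ∨ ∃ c, pvReach g cn c ∧ pvTE g c) := by
  unfold is_activity_class
  by_cases hcn : cn ∈ pvTargets
  · simp [hcn]
  · simp only [hcn, if_false]
    constructor
    · intro h
      refine Or.inr (pvBfsLoop_true g cn [cn] _ ?_ h)
      intro x hx
      have hx' : x = cn := by simpa using hx
      subst hx'
      exact Relation.ReflTransGen.refl
    · rintro (h | ⟨c, hr, hte⟩)
      · exact h.elim
      · cases hb : pvBfsLoop g [cn] (PySem.Set.ofList [cn]) with
        | true => rfl
        | false =>
          refine absurd ⟨c, hr, hte⟩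
            (pvBfsLoop_false g [cn] _ ?_ ?_ hb cn (by simp [PySem.Set.ofList]))
          · intro x hx; simpa [PySem.Set.ofList] using hx
          · intro d hd hdq
            have hd' : d = cn := by simpa [PySem.Set.ofList] using hd
            subst hd'
            simp at hdq

lemma pvSatLoop_eq_none {g : List (String × List String)} {R : PySem.Set String}
    (h : pvSatOuter g R PySem.Set.empty R = none) : pvSatLoop g R = true := by
  rw [pvSatLoop]
  split
  · rfl
  · next nw heq => rw [heq] at h; cases h

lemma pvSatLoop_eq_empty {g : List (String × List String)} {R nw : PySem.Set String}
    (h : pvSatOuter g R PySem.Set.empty R = some nw) (hnw : nw.isEmpty) :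
    pvSatLoop g R = false := by
  rw [pvSatLoop]
  split
  · next heq => rw [heq] at h; cases h
  · next nw' heq =>
    have : nw' = nw := by rw [heq] at h; simpa using h
    subst this
    rw [dif_pos hnw]

lemma pvSatLoop_eq_step {g : List (String × List String)} {R nw : PySem.Set String}
    (h : pvSatOuter g R PySem.Set.empty R = some nw) (hnw : ¬ nw.isEmpty) :
    pvSatLoop g R = pvSatLoop g (PySem.Set.union R nw) := by
  rw [pvSatLoop]
  split
  · next heq => rw [heq] at h; cases h
  · next nw' heq =>
    have : nw' = nw := by rw [heq] at h; simpa using h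
    subst this
    rw [dif_neg hnw]

lemma pvSatInner_none :
    ∀ (ss : List String) (r acc : PySem.Set String),
      pvSatInner r acc ss = none → ∃ s ∈ ss, s ∈ pvTargets := by
  intro ss
  induction ss with
  | nil => intro r acc h; simp [pvSatInner] at h
  | cons s rest ih =>
    intro r acc h
    simp only [pvSatInner] at h
    by_cases h1 : s ∈ pvTargets
    · exact ⟨s, by simp, h1⟩
    · rw [if_neg h1] at h
      by_cases h2 : s ≠ pvObj ∧ s ∉ r
      · rw [if_pos h2] at h
        obtain ⟨t, ht, htt⟩ := ih r _ h; exact ⟨t, by simp [ht], htt⟩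
      · rw [if_neg h2] at h
        obtain ⟨t, ht, htt⟩ := ih r _ h; exact ⟨t, by simp [ht], htt⟩

lemma pvSatInner_some :
    ∀ (ss : List String) (r acc acc' : PySem.Set String), pvSatInner r acc ss = some acc' →
      (∀ s ∈ ss, s ∉ pvTargets) ∧
      (∀ x ∈ acc, x ∈ acc') ∧
      (∀ s ∈ ss, s ≠ pvObj → s ∉ r → s ∈ acc') := by
  intro ss
  induction ss with
  | nil =>
    intro r acc acc' h
    simp only [pvSatInner, Option.some.injEq] at h
    subst h
    exact ⟨by simp, fun x hx => hx, by simp⟩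
  | cons s rest ih =>
    intro r acc acc' h
    simp only [pvSatInner] at h
    by_cases h1 : s ∈ pvTargets
    · rw [if_pos h1] at h; cases h
    · rw [if_neg h1] at h
      by_cases h2 : s ≠ pvObj ∧ s ∉ r
      · rw [if_pos h2] at h
        obtain ⟨A, B, C⟩ := ih r _ acc' h
        refine ⟨?_, fun x hx => B x ((PySem.Set.mem_add _ _ _).2 (Or.inl hx)), ?_⟩
        · intro t ht; rcases List.mem_cons.1 ht with rfl | ht
          · exact h1
          · exact A t ht
        · intro t ht ho hr; rcases List.mem_cons.1 ht with rfl | ht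
          · exact B t ((PySem.Set.mem_add _ _ _).2 (Or.inr rfl))
          · exact C t ht ho hr
      · rw [if_neg h2] at h
        obtain ⟨A, B, C⟩ := ih r _ acc' h
        refine ⟨?_, B, ?_⟩
        · intro t ht; rcases List.mem_cons.1 ht with rfl | ht
          · exact h1
          · exact A t ht
        · intro t ht ho hr; rcases List.mem_cons.1 ht with rfl | ht
          · exact absurd ⟨ho, hr⟩ h2
          · exact C t ht ho hr

lemma pvSatOuter_none (g : List (String × List String)) :
    ∀ (cs : List String) (r acc : PySem.Set String),
      pvSatOuter g r acc cs = none → ∃ c ∈ cs, pvTE g c := by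
  intro cs
  induction cs with
  | nil => intro r acc h; simp [pvSatOuter] at h
  | cons c cs ih =>
    intro r acc h
    simp only [pvSatOuter] at h
    cases hin : pvSatInner r acc (pvSuccs g c) with
    | none =>
      obtain ⟨s, hs, hst⟩ := pvSatInner_none _ r acc hin
      exact ⟨c, by simp, s, hs, hst⟩
    | some acc' =>
      rw [hin] at h
      obtain ⟨c', hc', hte⟩ := ih r acc' h
      exact ⟨c', by simp [hc'], hte⟩

lemma pvSatOuter_some (g : List (String × List String)) :
    ∀ (cs : List String) (r acc nw : PySem.Set String), pvSatOuter g r acc cs = some nw →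
      (∀ c ∈ cs, ¬ pvTE g c) ∧
      (∀ x ∈ acc, x ∈ nw) ∧
      (∀ c ∈ cs, ∀ s ∈ pvSuccs g c, s ≠ pvObj → s ∉ r → s ∈ nw) := by
  intro cs
  induction cs with
  | nil =>
    intro r acc nw h
    simp only [pvSatOuter, Option.some.injEq] at h
    subst h
    exact ⟨by simp, fun x hx => hx, by simp⟩
  | cons c cs ih =>
    intro r acc nw h
    simp only [pvSatOuter] at h
    cases hin : pvSatInner r acc (pvSuccs g c) with
    | none => simp [hin] at h
    | some acc' =>
      rw [hin] at h
      obtain ⟨A', B', C'⟩ := pvSatInner_some _ r acc acc' hin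
      obtain ⟨A, B, C⟩ := ih r acc' nw h
      refine ⟨?_, fun x hx => B x (B' x hx), ?_⟩
      · intro d hd
        rcases List.mem_cons.1 hd with rfl | hd
        · exact fun ⟨s, hs, hst⟩ => A' s hs hst
        · exact A d hd
      · intro d hd s hs ho hr
        rcases List.mem_cons.1 hd with rfl | hd
        · exact B s (C' s hs ho hr)
        · exact C d hd s hs ho hr

lemma pvSatLoop_true (g : List (String × List String)) (cn : String) :
    ∀ (R : PySem.Set String), (∀ x ∈ R, pvReach g cn x) →
      pvSatLoop g R = true → ∃ c, pvReach g cn c ∧ pvTE g c := by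
  intro R
  induction R using pvSatLoop.induct g with
  | case1 R h' =>
    intro hR _
    obtain ⟨c, hc, hte⟩ := pvSatOuter_none g R R PySem.Set.empty h'
    exact ⟨c, hR c hc, hte⟩
  | case2 R nw h' hnw =>
    intro _ htrue
    rw [pvSatLoop_eq_empty h' hnw] at htrue
    cases htrue
  | case3 R nw h' hnw ih =>
    intro hR htrue
    apply ih
    · intro x hx
      rcases (PySem.Set.mem_union _ _ _).1 hx with hxR | hxn
      · exact hR x hxR
      · rcases pvSatOuter_new g R R PySem.Set.empty nw h' x hxn with he | ⟨c, hc, hi, ht, ho, _⟩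
        · simp [PySem.Set.empty] at he
        · exact Relation.ReflTransGen.tail (hR c hc) ⟨hi, ht, ho⟩
    · rwa [pvSatLoop_eq_step h' hnw] at htrue

lemma pvSatLoop_false (g : List (String × List String)) :
    ∀ (R : PySem.Set String), pvSatLoop g R = false → ∀ x ∈ R, pvSafe g x := by
  intro R
  induction R using pvSatLoop.induct g with
  | case1 R h' =>
    intro hfalse
    rw [pvSatLoop_eq_none h'] at hfalse
    cases hfalse
  | case2 R nw h' hnw =>
    intro _ x hx
    obtain ⟨A, _, C⟩ := pvSatOuter_some g R R PySem.Set.empty nw h'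
    have hnil : nw = [] := List.isEmpty_iff.1 hnw
    refine pvClosed_safe g R (fun c hc => ⟨A c hc, ?_⟩) x hx
    intro s hs ho
    by_cases hr : s ∈ R
    · exact hr
    · have hmem := C c hc s hs ho hr
      simp [hnil] at hmem
  | case3 R nw h' hnw ih =>
    intro hfalse x hx
    exact ih (by rwa [pvSatLoop_eq_step h' hnw] at hfalse) x
      ((PySem.Set.mem_union _ _ _).2 (Or.inl hx))

theorem is_activity_class_B_iff (cn : String) (g : List (String × List String)) :
    is_activity_class_alt cn g = true ↔
      (cn ∈ pvTargets ∨ ∃ c, pvReach g cn c ∧ pvTE g c) := by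
  unfold is_activity_class_alt
  by_cases hcn : cn ∈ pvTargets
  · simp [hcn]
  · simp only [hcn, if_false]
    constructor
    · intro h
      refine Or.inr (pvSatLoop_true g cn _ ?_ h)
      intro x hx
      have hx' : x = cn := by simpa [PySem.Set.ofList] using hx
      subst hx'
      exact Relation.ReflTransGen.refl
    · rintro (h | ⟨c, hr, hte⟩)
      · exact h.elim
      · cases hb : pvSatLoop g (PySem.Set.ofList [cn]) with
        | true => rfl
        | false =>
          exact absurd ⟨c, hr, hte⟩
            (pvSatLoop_false g _ hb cn (by simp [PySem.Set.ofList]))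

-- ===== VERDICT (by name: the statement is the Claim_ definition above) =====
theorem is_activity_class_spec : Claim_equal_is_activity_class := by
  intro cn g _
  unfold Spec_is_activity_class
  exact Bool.eq_iff_iff.2 ((is_activity_class_A_iff cn g).trans (is_activity_class_B_iff cn g).symm)
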